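-- pv_equiv track=rewrite | github.com/PxYu/Pretraining-CLIR | src/dataset/clef_dataset.py | train_collate
-- ===== SOURCE A (Python) =====
-- def train_collate(batch):
--
--     qids, dids, queries, documents, y = [], [], [], [], []
--     for (b_qids, b_dids, b_queries, b_documents, b_y) in batch:
--         qids.extend(b_qids)
--         dids.extend(b_dids)
--         queries.extend(b_queries)
--         documents.extend(b_documents)
--         y.extend(b_y)
--
--     return qids, dids, queries, documents, y
-- ===== SOURCE B (Python) =====
-- def train_collate(batch):
--     # Divide-and-conquer: collate each half recursively, then concatenate
--     # the five fields pairwise (recursion depth O(log n)).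
--     if not batch:
--         return [], [], [], [], []
--     if len(batch) == 1:
--         b = batch[0]
--         return list(b[0]), list(b[1]), list(b[2]), list(b[3]), list(b[4])
--     mid = len(batch) // 2
--     lq, ld, lqs, lds, ly = train_collate(batch[:mid])
--     rq, rd, rqs, rds, ry = train_collate(batch[mid:])
--     return lq + rq, ld + rd, lqs + rqs, lds + rds, ly + ry
-- ===== Notes on version B (the rewrite author's own statement) =====
-- stated objective: alternative
-- what changed: B collates by divide-and-conquer: it splits the batch in half, recursively collates each half, and concatenates the five resulting lists pairwise, instead of A's single left-to-right loop extending five accumulators.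
import Mathlib
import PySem

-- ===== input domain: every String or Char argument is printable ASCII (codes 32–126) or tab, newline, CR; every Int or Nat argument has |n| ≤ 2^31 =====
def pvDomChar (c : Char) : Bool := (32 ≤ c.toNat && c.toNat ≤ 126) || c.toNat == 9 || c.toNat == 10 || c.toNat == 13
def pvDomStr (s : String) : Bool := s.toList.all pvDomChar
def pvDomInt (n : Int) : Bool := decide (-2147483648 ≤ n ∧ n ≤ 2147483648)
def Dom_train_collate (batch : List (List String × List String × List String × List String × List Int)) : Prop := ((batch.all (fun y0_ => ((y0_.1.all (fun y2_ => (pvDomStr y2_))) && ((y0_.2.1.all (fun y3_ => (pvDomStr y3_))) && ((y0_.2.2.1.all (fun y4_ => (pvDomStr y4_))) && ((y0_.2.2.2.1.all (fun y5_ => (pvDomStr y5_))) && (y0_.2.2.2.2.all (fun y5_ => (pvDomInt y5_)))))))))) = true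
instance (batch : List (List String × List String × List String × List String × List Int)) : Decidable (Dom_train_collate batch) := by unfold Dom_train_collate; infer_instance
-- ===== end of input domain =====

-- B collates by divide-and-conquer (split, recurse on halves, concatenate pairwise)
-- instead of A's single left-to-right loop extending five accumulators (objective: alternative).

-- ===== PORT A =====
-- loop: extend each of the five accumulators with the tuple's components
def train_collate (batch : List (List String × List String × List String × List String × List Int)) : List String × List String × List String × List String × List Int :=
  batch.foldl
    (fun acc b =>
      (acc.1 ++ b.1, acc.2.1 ++ b.2.1, acc.2.2.1 ++ b.2.2.1,
       acc.2.2.2.1 ++ b.2.2.2.1, acc.2.2.2.2 ++ b.2.2.2.2))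
    ([], [], [], [], [])

-- ===== PORT B =====
-- concatenate the five fields of two collated halves pairwise
def pvCombine (l r : List String × List String × List String × List String × List Int) : List String × List String × List String × List String × List Int :=
  (l.1 ++ r.1, l.2.1 ++ r.2.1, l.2.2.1 ++ r.2.2.1, l.2.2.2.1 ++ r.2.2.2.1, l.2.2.2.2 ++ r.2.2.2.2)

-- divide and conquer: halve the batch, collate each half, concatenate the five fields pairwise
def train_collate_alt : List (List String × List String × List String × List String × List Int) → List String × List String × List String × List String × List Int
  | [] => ([], [], [], [], [])
  | [b] => (b.1, b.2.1, b.2.2.1, b.2.2.2.1, b.2.2.2.2)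
  | a :: b :: t =>
    pvCombine (train_collate_alt ((a :: b :: t).take ((a :: b :: t).length / 2)))
              (train_collate_alt ((a :: b :: t).drop ((a :: b :: t).length / 2)))
termination_by xs => xs.length
decreasing_by
  · simp [List.length_take]; omega
  · simp [List.length_drop]; omega

-- ===== PRECONDITION & SPEC =====
def Spec_train_collate (batch : List (List String × List String × List String × List String × List Int)) (out : List String × List String × List String × List String × List Int) : Prop := out = train_collate_alt batch
instance (batch : List (List String × List String × List String × List String × List Int)) (out : List String × List String × List String × List String × List Int) : Decidable (Spec_train_collate batch out) := by unfold Spec_train_collate; infer_instance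

-- ===== CLAIM (what is proved, stated in full; the proofs are below) =====
def Claim_equal_train_collate : Prop := ∀ (batch : List (List String × List String × List String × List String × List Int)), Dom_train_collate batch → Spec_train_collate batch (train_collate batch)

-- ===== LEMMAS AND PROOFS =====
-- the five flattened columns, the common value of both ports
def pvCols (batch : List (List String × List String × List String × List String × List Int)) : List String × List String × List String × List String × List Int :=
  ((batch.map (fun t => t.1)).flatten,
   (batch.map (fun t => t.2.1)).flatten,
   (batch.map (fun t => t.2.2.1)).flatten,
   (batch.map (fun t => t.2.2.2.1)).flatten,
   (batch.map (fun t => t.2.2.2.2)).flatten)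

theorem pvCols_append (xs ys : List (List String × List String × List String × List String × List Int)) :
    pvCols (xs ++ ys)
      = ((pvCols xs).1 ++ (pvCols ys).1, (pvCols xs).2.1 ++ (pvCols ys).2.1,
         (pvCols xs).2.2.1 ++ (pvCols ys).2.2.1, (pvCols xs).2.2.2.1 ++ (pvCols ys).2.2.2.1,
         (pvCols xs).2.2.2.2 ++ (pvCols ys).2.2.2.2) := by
  simp [pvCols]

theorem train_collate_foldl (batch : List (List String × List String × List String × List String × List Int)) :
    ∀ (init : List String × List String × List String × List String × List Int),
    batch.foldl
      (fun acc t =>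
        (acc.1 ++ t.1, acc.2.1 ++ t.2.1, acc.2.2.1 ++ t.2.2.1,
         acc.2.2.2.1 ++ t.2.2.2.1, acc.2.2.2.2 ++ t.2.2.2.2))
      init
    = (init.1 ++ (pvCols batch).1, init.2.1 ++ (pvCols batch).2.1,
       init.2.2.1 ++ (pvCols batch).2.2.1, init.2.2.2.1 ++ (pvCols batch).2.2.2.1,
       init.2.2.2.2 ++ (pvCols batch).2.2.2.2) := by
  induction batch with
  | nil => simp [pvCols]
  | cons hd tl ih =>
    intro init
    simp only [List.foldl, ih, pvCols, List.map, List.flatten, List.append_assoc, List.append_eq]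

theorem alt_eq_cols (batch : List (List String × List String × List String × List String × List Int)) :
    train_collate_alt batch = pvCols batch := by
  induction batch using train_collate_alt.induct with
  | case1 => rw [train_collate_alt]; rfl
  | case2 b => rw [train_collate_alt]; simp [pvCols]
  | case3 a b t ihl ihr =>
    rw [train_collate_alt, ihl, ihr]
    have h := pvCols_append (((a :: b :: t)).take ((a :: b :: t).length / 2))
      (((a :: b :: t)).drop ((a :: b :: t).length / 2))
    rw [List.take_append_drop] at h
    rw [pvCombine, h]

-- ===== VERDICT (by name: the statement is the Claim_ definition above) =====
theorem train_collate_spec : Claim_equal_train_collate := by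
  intro batch _
  unfold Spec_train_collate train_collate
  rw [alt_eq_cols, train_collate_foldl]
  simp [pvCols]
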